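-- pv_equiv track=rewrite | github.com/mahikb07/kaju | 2ndprat.py | rbfs_search
-- ===== SOURCE A (Python) =====
-- romania_map={
--     'Arad': {'Zerind': 75, 'Timisoara': 118, 'Sibiu': 140},
--     'Zerind': {'Arad': 75, 'Oradea': 71},
--     'Timisoara': {'Arad': 118, 'Lugoj': 111},
--     'Sibiu': {'Arad': 140, 'Oradea': 151, 'Fagaras': 99, 'Rimnicu Vilcea': 80},
--     'Oradea': {'Zerind': 71, 'Sibiu': 151},
--     'Lugoj':{'Timisoara': 111, 'Mehadia': 70},
--     'Fagaras':{'Sibiu': 99, 'Bucharest': 211},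
--     'Rimnicu Vilcea': {'Sibiu':80 , 'Craiova': 146, 'Pitesti': 97},
--     'Mehadia': {'Lugoj': 70, 'Drobeta': 75},
--     'Drobeta': {'Mehadia': 75, 'Craiova': 120},
--     'Craiova':{'Drobeta': 120, 'Rimnicu Vilcea': 146, 'Pitesti': 138},
--     'Pitesti':{'Rimnicu Vilcea': 97, 'Craiova': 138, 'Bucharest': 101},
--     'Bucharest':{'Fagaras': 211, 'Pitesti': 101}
-- }
--
-- heuristics ={
--     'Arad': 366,
--     'Zerind': 374,
--     'Timisoara': 329,
--     'Sibiu':253,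
--     'Oradea': 380,
--     'Lugoj': 244,
--     'Fagaras': 176,
--     'Rimnicu Vilcea': 193,
--     'Mebadia': 241,
--     'Drobeta': 242,
--     'Craiova': 160,
--     'Pitesti': 100,
--     'Bucharest': 0
-- }
--
-- def rbfs_search(start, goal, path, f_limit):
--     if start==goal:
--         return path
--     successors = romania_map[start]
--     if len(successors) == 0:
--         return None
--     sorted_successors= sorted(successors, key=lambda x: successors[x]+ heuristics[x])
--     for city in sorted_successors:
--         new_path = path + [city]
--         f_value = successors [city] + heuristics[city]
--         if f_value> f_limit:
--             return None
--         result=rbfs_search(city, goal, new_path, min(f_limit, f_value))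
--         if result is not None:
--             return result
--     return None
-- ===== SOURCE B (Python) =====
-- romania_map={
--     'Arad': {'Zerind': 75, 'Timisoara': 118, 'Sibiu': 140},
--     'Zerind': {'Arad': 75, 'Oradea': 71},
--     'Timisoara': {'Arad': 118, 'Lugoj': 111},
--     'Sibiu': {'Arad': 140, 'Oradea': 151, 'Fagaras': 99, 'Rimnicu Vilcea': 80},
--     'Oradea': {'Zerind': 71, 'Sibiu': 151},
--     'Lugoj':{'Timisoara': 111, 'Mehadia': 70},
--     'Fagaras':{'Sibiu': 99, 'Bucharest': 211},
--     'Rimnicu Vilcea': {'Sibiu':80 , 'Craiova': 146, 'Pitesti': 97},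
--     'Mehadia': {'Lugoj': 70, 'Drobeta': 75},
--     'Drobeta': {'Mehadia': 75, 'Craiova': 120},
--     'Craiova':{'Drobeta': 120, 'Rimnicu Vilcea': 146, 'Pitesti': 138},
--     'Pitesti':{'Rimnicu Vilcea': 97, 'Craiova': 138, 'Bucharest': 101},
--     'Bucharest':{'Fagaras': 211, 'Pitesti': 101}
-- }
--
-- heuristics ={
--     'Arad': 366,
--     'Zerind': 374,
--     'Timisoara': 329,
--     'Sibiu':253,
--     'Oradea': 380,
--     'Lugoj': 244,
--     'Fagaras': 176,
--     'Rimnicu Vilcea': 193,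
--     'Mebadia': 241,
--     'Drobeta': 242,
--     'Craiova': 160,
--     'Pitesti': 100,
--     'Bucharest': 0
-- }
--
-- def rbfs_search(start, goal, path, f_limit):
--     # Explicit-stack iteration instead of recursion: each frame is
--     # (city, path so far, f_limit for this node, next successor index).
--     stack = [(start, path, f_limit, 0)]
--     while stack:
--         city, p, limit, i = stack[-1]
--         if city == goal:
--             return p
--         nbrs = romania_map[city]
--         succs = sorted(nbrs, key=lambda x: nbrs[x] + heuristics[x])
--         if i >= len(succs):
--             stack.pop()
--             continue
--         stack[-1] = (city, p, limit, i + 1)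
--         nxt = succs[i]
--         f = nbrs[nxt] + heuristics[nxt]
--         if f > limit:
--             # successors are sorted by f: nothing at this node fits the limit
--             stack.pop()
--             continue
--         stack.append((nxt, p + [nxt], min(limit, f), 0))
--     return None
-- ===== Notes on version B (the rewrite author's own statement) =====
-- stated objective: alternative
-- what changed: rbfs_search is rewritten as an explicit-stack iteration: a while-loop over frames (city, path, f_limit, next-successor-index) replaces the recursive call / for-loop pair, popping a frame when its sorted successor list is exhausted or the next f-value exceeds the frame's limit.
import Mathlib
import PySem

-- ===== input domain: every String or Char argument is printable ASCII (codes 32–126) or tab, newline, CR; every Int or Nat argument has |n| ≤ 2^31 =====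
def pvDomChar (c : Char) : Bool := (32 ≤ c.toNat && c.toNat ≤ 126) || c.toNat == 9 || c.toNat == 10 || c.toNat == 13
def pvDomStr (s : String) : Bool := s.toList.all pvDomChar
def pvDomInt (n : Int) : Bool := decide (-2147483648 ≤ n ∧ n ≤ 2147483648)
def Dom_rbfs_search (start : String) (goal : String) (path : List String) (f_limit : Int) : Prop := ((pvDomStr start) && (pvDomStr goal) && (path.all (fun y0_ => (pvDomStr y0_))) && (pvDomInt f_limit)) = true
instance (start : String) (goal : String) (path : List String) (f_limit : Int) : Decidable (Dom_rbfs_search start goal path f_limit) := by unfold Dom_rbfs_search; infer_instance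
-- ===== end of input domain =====

-- B rewrites the recursive best-first search as an explicit-stack iteration (same exploration order,
-- different control structure); equivalence is proved on Pre_, the inputs where the Python A returns
-- (elsewhere both Pythons raise the same KeyError, caused by the 'Mebadia' typo in heuristics).

-- shared module constants (the two dict literals of the Python module)
def romaniaMap : PySem.Dict String (PySem.Dict String Int) := PySem.Dict.ofList [("Arad", PySem.Dict.ofList [("Zerind", 75), ("Timisoara", 118), ("Sibiu", 140)]), ("Zerind", PySem.Dict.ofList [("Arad", 75), ("Oradea", 71)]), ("Timisoara", PySem.Dict.ofList [("Arad", 118), ("Lugoj", 111)]), ("Sibiu", PySem.Dict.ofList [("Arad", 140), ("Oradea", 151), ("Fagaras", 99), ("Rimnicu Vilcea", 80)]), ("Oradea", PySem.Dict.ofList [("Zerind", 71), ("Sibiu", 151)]), ("Lugoj", PySem.Dict.ofList [("Timisoara", 111), ("Mehadia", 70)]), ("Fagaras", PySem.Dict.ofList [("Sibiu", 99), ("Bucharest", 211)]), ("Rimnicu Vilcea", PySem.Dict.ofList [("Sibiu", 80), ("Craiova", 146), ("Pitesti", 97)]), ("Mehadia", PySem.Dict.ofList [("Lugoj", 70), ("Drobeta",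 75)]), ("Drobeta", PySem.Dict.ofList [("Mehadia", 75), ("Craiova", 120)]), ("Craiova", PySem.Dict.ofList [("Drobeta", 120), ("Rimnicu Vilcea", 146), ("Pitesti", 138)]), ("Pitesti", PySem.Dict.ofList [("Rimnicu Vilcea", 97), ("Craiova", 138), ("Bucharest", 101)]), ("Bucharest", PySem.Dict.ofList [("Fagaras", 211), ("Pitesti", 101)])]

def heur : PySem.Dict String Int := PySem.Dict.ofList [("Arad", 366), ("Zerind", 374), ("Timisoara", 329), ("Sibiu", 253), ("Oradea", 380), ("Lugoj", 244), ("Fagaras", 176), ("Rimnicu Vilcea", 193), ("Mebadia", 241), ("Drobeta", 242), ("Craiova", 160), ("Pitesti", 100), ("Bucharest", 0)]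

-- f-value 'successors[x] + heuristics[x]' and the sorted successor list, as both Pythons compute them
-- (heur.getD x 0: inside Pre_ the lookup never misses — Python's raising case is excluded by Pre_)
def fVal (nbrs : PySem.Dict String Int) (x : String) : Int := nbrs.getD x 0 + heur.getD x 0
def sortedSucc (nbrs : PySem.Dict String Int) : List String := PySem.List.sorted nbrs.keys (fun x => fVal nbrs x)

-- ===== PORT A =====
-- fuel ('fa') only makes the recursion structurally total; on every input admitted by Pre_ it is never
-- exhausted (exhaustion yields 'none'; a genuine Python return is 'some r').
def loopA (next : String → List String → Int → Option (Option (List String)))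
    (successors : PySem.Dict String Int) (path : List String) (f_limit : Int) :
    List String → Option (Option (List String))
  | [] => some none
  | city :: rest =>
    let new_path := path ++ [city]
    let f_value := fVal successors city
    if f_value > f_limit then some none
    else
      match next city new_path (min f_limit f_value) with
      | none => none
      | some (some r) => some (some r)
      | some none => loopA next successors path f_limit rest

def goA : Nat → String → String → List String → Int → Option (Option (List String))
  | 0, _, _, _, _ => none
  | fa+1, start, goal, path, f_limit =>
    if start = goal then some (some path)
    else
      let successors := romaniaMap.getD start PySem.Dict.empty
      if successors.size = 0 then some none
      else loopA (fun city new_path lim => goA fa city goal new_path lim) successors path f_limit (sortedSucc successors)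

def rbfs_search (start : String) (goal : String) (path : List String) (f_limit : Int) : Option (List String) :=
  (goA 30 start goal path f_limit).getD none

-- ===== PORT B =====
-- explicit-stack iteration: a frame is (city, path, f_limit, next successor index); fuel = loop steps
def stepB : Nat → List (String × List String × Int × Nat) → String → Option (Option (List String))
  | 0, _, _ => none
  | _+1, [], _ => some none
  | fb+1, (city, p, limit, i) :: rest, goal =>
    if city = goal then some (some p)
    else
      let nbrs := romaniaMap.getD city PySem.Dict.empty
      let succs := sortedSucc nbrs
      if succs.length ≤ i then stepB fb rest goal
      else
        let nxt := succs.getD i ""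
        let f := fVal nbrs nxt
        if f > limit then stepB fb rest goal
        else stepB fb ((nxt, p ++ [nxt], min limit f, 0) :: (city, p, limit, i+1) :: rest) goal

def rbfs_search_alt (start : String) (goal : String) (path : List String) (f_limit : Int) : Option (List String) :=
  (stepB (6 ^ 32) [(start, path, f_limit, 0)] goal).getD none

-- ===== PRECONDITION & SPEC =====
def safeA : List String := ["Arad", "Timisoara", "Sibiu", "Lugoj", "Fagaras", "Rimnicu Vilcea", "Pitesti", "Bucharest"]
def safeC : List String := ["Sibiu", "Fagaras", "Rimnicu Vilcea", "Drobeta", "Craiova", "Pitesti", "Bucharest"]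
-- Pre_ excludes exactly the inputs on which the Python A raises: KeyError(start) when start is not a key
-- of romania_map (and start ≠ goal), and the KeyError('Mehadia') caused by the missing heuristics entry
-- (misspelt 'Mebadia') whenever the search would expand Lugoj or Drobeta — which happens, per start city,
-- exactly above the stated f_limit thresholds / outside the stated goal sets.  A returns on everything Pre_ admits.
def Pre_rbfs_search (start : String) (goal : String) (path : List String) (f_limit : Int) : Prop :=
  start = goal
  ∨ start ∈ (["Zerind", "Oradea", "Fagaras", "Rimnicu Vilcea", "Pitesti", "Bucharest"] : List String)
  ∨ (start = "Arad" ∧ (f_limit < 447 ∨ goal ∈ safeA))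
  ∨ (start = "Timisoara" ∧ (f_limit < 355 ∨ goal = "Lugoj"))
  ∨ (start = "Sibiu" ∧ (f_limit < 506 ∨ goal ∈ safeA))
  ∨ (start = "Mehadia" ∧ (f_limit < 314 ∨ goal = "Lugoj"))
  ∨ (start = "Craiova" ∧ (f_limit < 362 ∨ goal ∈ safeC))
instance (start : String) (goal : String) (path : List String) (f_limit : Int) : Decidable (Pre_rbfs_search start goal path f_limit) := by unfold Pre_rbfs_search; infer_instance

def pvWitness_rbfs_search : String × String × List String × Int := ("Arad", "Bucharest", [], 2000)

def Spec_rbfs_search (start : String) (goal : String) (path : List String) (f_limit : Int) (out : Option (List String)) : Prop := out = rbfs_search_alt start goal path f_limit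
instance (start : String) (goal : String) (path : List String) (f_limit : Int) (out : Option (List String)) : Decidable (Spec_rbfs_search start goal path f_limit out) := by unfold Spec_rbfs_search; infer_instance

-- ===== CLAIM (what is proved, stated in full; the proofs are below) =====
def Claim_equal_rbfs_search : Prop := ∀ (start : String) (goal : String) (path : List String) (f_limit : Int), Dom_rbfs_search start goal path f_limit → Pre_rbfs_search start goal path f_limit → Spec_rbfs_search start goal path f_limit (rbfs_search start goal path f_limit)

-- ===== LEMMAS AND PROOFS =====
def cityList : List String := ["Arad", "Zerind", "Timisoara", "Sibiu", "Oradea", "Lugoj", "Fagaras", "Rimnicu Vilcea", "Mehadia", "Drobeta", "Craiova", "Pitesti", "Bucharest"]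
def FVals : List Int := [70, 75, 101, 197, 201, 211, 238, 273, 275, 280, 290, 298, 306, 314, 317, 333, 339, 352, 355, 362, 387, 393, 404, 440, 441, 445, 447, 449, 451, 484, 506, 531]
def repList : List Int := 69 :: FVals

-- 'A's node step': node (c, p, l) with its successor loop resumed at index i
def procFrame (fa : Nat) (c g : String) (p : List String) (l : Int) (i : Nat) : Option (Option (List String)) :=
  if c = g then some (some p)
  else loopA (fun city new_path lim => goA fa city g new_path lim) (romaniaMap.getD c PySem.Dict.empty) p l ((sortedSucc (romaniaMap.getD c PySem.Dict.empty)).drop i)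

lemma size_eq_keys_len (d : PySem.Dict String Int) : d.size = d.keys.length := by
  simp [PySem.Dict.size, PySem.Dict.keys]

lemma goA_succ (fa : Nat) (c g : String) (p : List String) (l : Int) :
    goA (fa+1) c g p l = procFrame fa c g p l 0 := by
  rw [goA, procFrame]
  by_cases hg : c = g
  · simp [hg]
  · simp only [hg, if_false]
    by_cases hz : (romaniaMap.getD c PySem.Dict.empty).size = 0
    · have hk : (sortedSucc (romaniaMap.getD c PySem.Dict.empty)) = [] := by
        apply List.eq_nil_of_length_eq_zero
        rw [sortedSucc, PySem.List.length_sorted, ← size_eq_keys_len, hz]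
      simp [hz, hk, loopA]
    · simp [hz]

lemma keysLen4 (c : String) : (sortedSucc (romaniaMap.getD c PySem.Dict.empty)).length ≤ 4 := by
  rcases hq : romaniaMap.get? c with _ | v
  · rw [sortedSucc, PySem.List.length_sorted, PySem.Dict.getD_of_get?_eq_none _ _ hq]
    decide
  · rw [sortedSucc, PySem.List.length_sorted, PySem.Dict.getD_of_get?_eq_some _ _ hq]
    have hv := PySem.Dict.mem_items_of_get?_eq_some _ hq
    have : v ∈ (romaniaMap.items).map Prod.snd := List.mem_map_of_mem hv
    simp only [romaniaMap, PySem.Dict.ofList] at this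
    fin_cases this <;> decide

lemma stepB_goal (fb : Nat) (c g : String) (p : List String) (l : Int) (i : Nat)
    (rest : List (String × List String × Int × Nat)) (h : c = g) :
    stepB (fb+1) ((c, p, l, i) :: rest) g = some (some p) := by
  simp [stepB, h]

lemma stepB_exhaust (fb : Nat) (c g : String) (p : List String) (l : Int) (i : Nat)
    (rest : List (String × List String × Int × Nat)) (h : ¬ c = g)
    (h2 : (sortedSucc (romaniaMap.getD c PySem.Dict.empty)).length ≤ i) :
    stepB (fb+1) ((c, p, l, i) :: rest) g = stepB fb rest g := by
  simp [stepB, h, h2]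

lemma stepB_cut (fb : Nat) (c g : String) (p : List String) (l : Int) (i : Nat)
    (rest : List (String × List String × Int × Nat)) (h : ¬ c = g)
    (h2 : i < (sortedSucc (romaniaMap.getD c PySem.Dict.empty)).length)
    (h3 : fVal (romaniaMap.getD c PySem.Dict.empty) ((sortedSucc (romaniaMap.getD c PySem.Dict.empty)).getD i "") > l) :
    stepB (fb+1) ((c, p, l, i) :: rest) g = stepB fb rest g := by
  simp only [stepB, h, if_false]
  rw [if_neg (by omega), if_pos h3]

lemma stepB_push (fb : Nat) (c g : String) (p : List String) (l : Int) (i : Nat)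
    (rest : List (String × List String × Int × Nat)) (h : ¬ c = g)
    (h2 : i < (sortedSucc (romaniaMap.getD c PySem.Dict.empty)).length)
    (h3 : ¬ fVal (romaniaMap.getD c PySem.Dict.empty) ((sortedSucc (romaniaMap.getD c PySem.Dict.empty)).getD i "") > l) :
    stepB (fb+1) ((c, p, l, i) :: rest) g =
      stepB fb (((sortedSucc (romaniaMap.getD c PySem.Dict.empty)).getD i "",
                 p ++ [(sortedSucc (romaniaMap.getD c PySem.Dict.empty)).getD i ""],
                 min l (fVal (romaniaMap.getD c PySem.Dict.empty) ((sortedSucc (romaniaMap.getD c PySem.Dict.empty)).getD i "")), 0)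
                :: (c, p, l, i+1) :: rest) g := by
  simp only [stepB, h, if_false]
  rw [if_neg (by omega), if_neg h3]

lemma pow_arith (fa : Nat) : 4 * (6 ^ (fa+1) + 1) + 1 ≤ 6 ^ (fa+2) := by
  have h1 : (6:Nat) ^ (fa+2) = 6 ^ (fa+1) * 6 := pow_succ 6 (fa+1)
  have h2 : 1 ≤ (6:Nat) ^ (fa+1) := Nat.one_le_pow _ _ (by norm_num)
  omega

lemma simCore (fa : Nat) (g : String)
    (CH : ∀ x px lx restx rr, goA fa x g px lx = some rr →
      ∃ k, 1 ≤ k ∧ k ≤ 6 ^ (fa+1) ∧ ∀ fb, stepB (fb + k) ((x, px, lx, 0) :: restx) g =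
        (match rr with | some o => some (some o) | none => stepB fb restx g)) :
    ∀ c p l i rest r, procFrame fa c g p l i = some r →
      ∃ k, 1 ≤ k ∧ k ≤ 6 ^ (fa+2) ∧ ∀ fb, stepB (fb + k) ((c, p, l, i) :: rest) g =
        (match r with | some o => some (some o) | none => stepB fb rest g) := by
  intro c p l i rest r h
  by_cases hg : c = g
  · rw [procFrame, if_pos hg] at h
    obtain rfl : r = some p := by injection h with h'; exact h'.symm
    refine ⟨1, le_refl 1, by have := pow_arith fa; omega, fun fb => ?_⟩
    rw [stepB_goal fb c g p l i rest hg]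
  · rw [procFrame, if_neg hg] at h
    have hlen := keysLen4 c
    -- inner induction on remaining successors
    have inner : ∀ n i r rest, (sortedSucc (romaniaMap.getD c PySem.Dict.empty)).length - i ≤ n →
        loopA (fun city new_path lim => goA fa city g new_path lim) (romaniaMap.getD c PySem.Dict.empty) p l ((sortedSucc (romaniaMap.getD c PySem.Dict.empty)).drop i) = some r →
        ∃ k, 1 ≤ k ∧ k ≤ n * (6 ^ (fa+1) + 1) + 1 ∧ ∀ fb, stepB (fb + k) ((c, p, l, i) :: rest) g =
          (match r with | some o => some (some o) | none => stepB fb rest g) := by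
      intro n
      induction n with
      | zero =>
        intro i r rest hn h
        have hle : (sortedSucc (romaniaMap.getD c PySem.Dict.empty)).length ≤ i := by omega
        rw [List.drop_eq_nil_of_le hle] at h
        rw [loopA] at h
        obtain rfl : r = none := by injection h with h'; exact h'.symm
        exact ⟨1, le_refl 1, by omega, fun fb => stepB_exhaust fb c g p l i rest hg hle⟩
      | succ n' ihn =>
        intro i r rest hn h
        by_cases hle : (sortedSucc (romaniaMap.getD c PySem.Dict.empty)).length ≤ i
        · rw [List.drop_eq_nil_of_le hle] at h
          rw [loopA] at h
          obtain rfl : r = none := by injection h with h'; exact h'.symm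
          exact ⟨1, le_refl 1, by omega, fun fb => stepB_exhaust fb c g p l i rest hg hle⟩
        · have hi : i < (sortedSucc (romaniaMap.getD c PySem.Dict.empty)).length := by omega
          rw [List.drop_eq_getElem_cons hi] at h
          rw [loopA] at h
          have hgd : (sortedSucc (romaniaMap.getD c PySem.Dict.empty)).getD i "" =
              (sortedSucc (romaniaMap.getD c PySem.Dict.empty))[i] := List.getD_eq_getElem _ _ hi
          by_cases hf : fVal (romaniaMap.getD c PySem.Dict.empty) (sortedSucc (romaniaMap.getD c PySem.Dict.empty))[i] > l
          · rw [if_pos hf] at h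
            obtain rfl : r = none := by injection h with h'; exact h'.symm
            refine ⟨1, le_refl 1, by omega, fun fb => stepB_cut fb c g p l i rest hg hi (by rw [hgd]; exact hf)⟩
          · rw [if_neg hf] at h
            rcases hc : goA fa (sortedSucc (romaniaMap.getD c PySem.Dict.empty))[i] g
                (p ++ [(sortedSucc (romaniaMap.getD c PySem.Dict.empty))[i]])
                (min l (fVal (romaniaMap.getD c PySem.Dict.empty) (sortedSucc (romaniaMap.getD c PySem.Dict.empty))[i])) with _ | rr
            · rw [hc] at h; cases h
            · rw [hc] at h
              rcases rr with _ | o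
              · -- child returned Python None: loop continues at i+1
                obtain ⟨k2, hk21, hk2b, hstep2⟩ := ihn (i+1) r rest (by omega) h
                obtain ⟨k1, hk11, hk1b, hstep1⟩ := CH _ _ _ ((c, p, l, i+1) :: rest) _ hc
                have hsm : (n'+1) * (6 ^ (fa+1) + 1) = n' * (6 ^ (fa+1) + 1) + (6 ^ (fa+1) + 1) := by ring
                refine ⟨k1 + k2 + 1, by omega, by omega, fun fb => ?_⟩
                have e1 : fb + (k1 + k2 + 1) = ((fb + k2) + k1) + 1 := by omega
                rw [e1, stepB_push _ c g p l i rest hg hi (by rw [hgd]; exact hf), hgd, hstep1, hstep2]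
              · -- child returned a path
                obtain rfl : r = some o := by injection h with h'; exact h'.symm
                obtain ⟨k1, hk11, hk1b, hstep1⟩ := CH _ _ _ ((c, p, l, i+1) :: rest) _ hc
                have hsm : (n'+1) * (6 ^ (fa+1) + 1) = n' * (6 ^ (fa+1) + 1) + (6 ^ (fa+1) + 1) := by ring
                refine ⟨k1 + 1, by omega, by omega, fun fb => ?_⟩
                have e1 : fb + (k1 + 1) = (fb + k1) + 1 := by omega
                rw [e1, stepB_push _ c g p l i rest hg hi (by rw [hgd]; exact hf), hgd, hstep1]
    obtain ⟨k, hk1, hkb, hstep⟩ := inner 4 i r rest (by omega) h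
    exact ⟨k, hk1, le_trans hkb (pow_arith fa), hstep⟩

lemma sim : ∀ (fa : Nat) (c g : String) (p : List String) (l : Int) (i : Nat)
    (rest : List (String × List String × Int × Nat)) (r : Option (List String)),
    procFrame fa c g p l i = some r →
    ∃ k, 1 ≤ k ∧ k ≤ 6 ^ (fa+2) ∧ ∀ fb, stepB (fb + k) ((c, p, l, i) :: rest) g =
      (match r with | some o => some (some o) | none => stepB fb rest g) := by
  intro fa
  induction fa with
  | zero =>
    intro c g p l i rest r h
    exact simCore 0 g (fun x px lx restx rr hc => by rw [goA] at hc; cases hc) c p l i rest r h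
  | succ m ih =>
    intro c g p l i rest r h
    refine simCore (m+1) g (fun x px lx restx rr hc => ?_) c p l i rest r h
    rw [goA_succ] at hc
    exact ih x g px lx 0 restx rr hc

-- path-prefix irrelevance for port A
lemma pathGo : ∀ (fa : Nat) (c g : String) (q : List String) (l : Int) (p : List String),
    goA fa c g (p ++ q) l = Option.map (Option.map (p ++ ·)) (goA fa c g q l) := by
  intro fa
  induction fa with
  | zero => intro c g q l p; rw [goA, goA]; rfl
  | succ m ih =>
    have loopLem : ∀ (nbrs : PySem.Dict String Int) (g : String) (q : List String) (l : Int)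
        (p : List String) (xs : List String),
        loopA (fun city new_path lim => goA m city g new_path lim) nbrs (p ++ q) l xs = Option.map (Option.map (p ++ ·)) (loopA (fun city new_path lim => goA m city g new_path lim) nbrs q l xs) := by
      intro nbrs g q l p xs
      induction xs with
      | nil => rw [loopA, loopA]; rfl
      | cons x xs ihx =>
        rw [loopA, loopA]
        by_cases hf : fVal nbrs x > l
        · rw [if_pos hf, if_pos hf]; rfl
        · rw [if_neg hf, if_neg hf]
          have hq : (p ++ q) ++ [x] = p ++ (q ++ [x]) := by rw [List.append_assoc]
          rw [hq, ih x g (q ++ [x]) (min l (fVal nbrs x)) p]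
          rcases goA m x g (q ++ [x]) (min l (fVal nbrs x)) with _ | rr
          · rfl
          · rcases rr with _ | o
            · simpa using ihx
            · rfl
    intro c g q l p
    rw [goA, goA]
    by_cases hg : c = g
    · simp [hg]
    · simp only [hg, if_false]
      by_cases hz : (romaniaMap.getD c PySem.Dict.empty).size = 0
      · simp [hz]
      · simp only [hz, if_false]
        exact loopLem _ g q l p _

lemma romania_keys : romaniaMap.keys = cityList := by decide

lemma getD_of_not_city (c : String) (h : c ∉ cityList) :
    romaniaMap.getD c PySem.Dict.empty = PySem.Dict.empty := by
  apply PySem.Dict.getD_of_get?_eq_none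
  rw [PySem.Dict.get?_eq_none_iff_not_mem_keys, romania_keys]
  exact h

lemma keysSub : ∀ c ∈ cityList, ∀ x ∈ (romaniaMap.getD c PySem.Dict.empty).keys, x ∈ cityList := by decide

lemma fValsSub : ∀ c ∈ cityList, ∀ x ∈ (romaniaMap.getD c PySem.Dict.empty).keys,
    fVal (romaniaMap.getD c PySem.Dict.empty) x ∈ FVals := by decide

-- the result does not depend on which non-city string the goal is
lemma goalGo : ∀ (fa : Nat) (c : String) (g1 g2 : String) (p : List String) (l : Int),
    g1 ∉ cityList → g2 ∉ cityList → c ∈ cityList →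
    goA fa c g1 p l = goA fa c g2 p l := by
  intro fa
  induction fa with
  | zero => intro c g1 g2 p l _ _ _; rw [goA, goA]
  | succ m ih =>
    intro c g1 g2 p l hg1 hg2 hc
    have loopLem : ∀ (q : List String) (l' : Int) (xs : List String), (∀ x ∈ xs, x ∈ cityList) →
        loopA (fun city new_path lim => goA m city g1 new_path lim) (romaniaMap.getD c PySem.Dict.empty) q l' xs = loopA (fun city new_path lim => goA m city g2 new_path lim) (romaniaMap.getD c PySem.Dict.empty) q l' xs := by
      intro q l' xs hxs
      induction xs with
      | nil => rw [loopA, loopA]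
      | cons x xs ihx =>
        rw [loopA, loopA]
        by_cases hf : fVal (romaniaMap.getD c PySem.Dict.empty) x > l' <;>
          [rw [if_pos hf, if_pos hf]; rw [if_neg hf, if_neg hf]]
        rw [ih x g1 g2 (q ++ [x]) _ hg1 hg2 (hxs x List.mem_cons_self)]
        rcases goA m x g2 (q ++ [x]) (min l' (fVal (romaniaMap.getD c PySem.Dict.empty) x)) with _ | rr
        · rfl
        · rcases rr with _ | o
          · exact ihx (fun y hy => hxs y (List.mem_cons_of_mem _ hy))
          · rfl
    rw [goA, goA]
    have h1 : ¬ c = g1 := fun he => hg1 (he ▸ hc)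
    have h2 : ¬ c = g2 := fun he => hg2 (he ▸ hc)
    simp only [h1, h2, if_false]
    by_cases hz : (romaniaMap.getD c PySem.Dict.empty).size = 0
    · simp [hz]
    · simp only [hz, if_false]
      refine loopLem p l _ (fun x hx => ?_)
      rw [sortedSucc, PySem.List.mem_sorted] at hx
      exact keysSub c hc x hx

-- the result depends on f_limit only through the pattern { f ∈ FVals | f ≤ l }
lemma gapGo : ∀ (fa : Nat) (c g : String) (p : List String) (l1 l2 : Int),
    (∀ f ∈ FVals, ((f ≤ l1) ↔ (f ≤ l2))) →
    goA fa c g p l1 = goA fa c g p l2 := by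
  intro fa
  induction fa with
  | zero => intro c g p l1 l2 _; rw [goA, goA]
  | succ m ih =>
    intro c g p l1 l2 hpat
    rw [goA, goA]
    by_cases hg : c = g
    · simp [hg]
    · simp only [hg, if_false]
      by_cases hz : (romaniaMap.getD c PySem.Dict.empty).size = 0
      · simp [hz]
      · simp only [hz, if_false]
        have hc : c ∈ cityList := by
          by_contra hcc
          rw [getD_of_not_city c hcc] at hz
          exact hz (by decide)
        have loopLem : ∀ (xs : List String), (∀ x ∈ xs, x ∈ (romaniaMap.getD c PySem.Dict.empty).keys) →
            ∀ (q : List String) (l1 l2 : Int), (∀ f ∈ FVals, ((f ≤ l1) ↔ (f ≤ l2))) →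
            loopA (fun city new_path lim => goA m city g new_path lim) (romaniaMap.getD c PySem.Dict.empty) q l1 xs = loopA (fun city new_path lim => goA m city g new_path lim) (romaniaMap.getD c PySem.Dict.empty) q l2 xs := by
          intro xs
          induction xs with
          | nil => intro _ q l1 l2 _; rw [loopA, loopA]
          | cons x xs ihx =>
            intro hxs q l1 l2 hp
            have hfm : fVal (romaniaMap.getD c PySem.Dict.empty) x ∈ FVals :=
              fValsSub c hc x (hxs x List.mem_cons_self)
            have hiff := hp _ hfm
            rw [loopA, loopA]
            by_cases hf : fVal (romaniaMap.getD c PySem.Dict.empty) x > l1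
            · rw [if_pos hf, if_pos (by omega)]
            · rw [if_neg hf, if_neg (by omega)]
              have hpat' : ∀ f ∈ FVals, ((f ≤ min l1 (fVal (romaniaMap.getD c PySem.Dict.empty) x)) ↔
                  (f ≤ min l2 (fVal (romaniaMap.getD c PySem.Dict.empty) x))) := by
                intro f hf'
                have := hp f hf'
                rw [le_min_iff, le_min_iff]
                omega
              rw [ih x g (q ++ [x]) _ _ hpat']
              rcases goA m x g (q ++ [x]) (min l2 (fVal (romaniaMap.getD c PySem.Dict.empty) x)) with _ | rr
              · rfl
              · rcases rr with _ | o
                · exact ihx (fun y hy => hxs y (List.mem_cons_of_mem _ hy)) q l1 l2 hp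
                · rfl
        refine loopLem _ (fun x hx => ?_) p l1 l2 hpat
        rw [sortedSucc, PySem.List.mem_sorted] at hx
        exact hx
lemma repPattern (l : Int) : ∃ l', l' ∈ repList ∧ ∀ f ∈ FVals, ((f ≤ l) ↔ (f ≤ l')) := by
  by_cases h0 : (531 : Int) ≤ l
  · exact ⟨531, by decide, by intro f hf; simp only [FVals] at hf; fin_cases hf <;> omega⟩
  by_cases h1 : (506 : Int) ≤ l
  · exact ⟨506, by decide, by intro f hf; simp only [FVals] at hf; fin_cases hf <;> omega⟩
  by_cases h2 : (484 : Int) ≤ l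
  · exact ⟨484, by decide, by intro f hf; simp only [FVals] at hf; fin_cases hf <;> omega⟩
  by_cases h3 : (451 : Int) ≤ l
  · exact ⟨451, by decide, by intro f hf; simp only [FVals] at hf; fin_cases hf <;> omega⟩
  by_cases h4 : (449 : Int) ≤ l
  · exact ⟨449, by decide, by intro f hf; simp only [FVals] at hf; fin_cases hf <;> omega⟩
  by_cases h5 : (447 : Int) ≤ l
  · exact ⟨447, by decide, by intro f hf; simp only [FVals] at hf; fin_cases hf <;> omega⟩
  by_cases h6 : (445 : Int) ≤ l
  · exact ⟨445, by decide, by intro f hf; simp only [FVals] at hf; fin_cases hf <;> omega⟩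
  by_cases h7 : (441 : Int) ≤ l
  · exact ⟨441, by decide, by intro f hf; simp only [FVals] at hf; fin_cases hf <;> omega⟩
  by_cases h8 : (440 : Int) ≤ l
  · exact ⟨440, by decide, by intro f hf; simp only [FVals] at hf; fin_cases hf <;> omega⟩
  by_cases h9 : (404 : Int) ≤ l
  · exact ⟨404, by decide, by intro f hf; simp only [FVals] at hf; fin_cases hf <;> omega⟩
  by_cases h10 : (393 : Int) ≤ l
  · exact ⟨393, by decide, by intro f hf; simp only [FVals] at hf; fin_cases hf <;> omega⟩
  by_cases h11 : (387 : Int) ≤ l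
  · exact ⟨387, by decide, by intro f hf; simp only [FVals] at hf; fin_cases hf <;> omega⟩
  by_cases h12 : (362 : Int) ≤ l
  · exact ⟨362, by decide, by intro f hf; simp only [FVals] at hf; fin_cases hf <;> omega⟩
  by_cases h13 : (355 : Int) ≤ l
  · exact ⟨355, by decide, by intro f hf; simp only [FVals] at hf; fin_cases hf <;> omega⟩
  by_cases h14 : (352 : Int) ≤ l
  · exact ⟨352, by decide, by intro f hf; simp only [FVals] at hf; fin_cases hf <;> omega⟩
  by_cases h15 : (339 : Int) ≤ l
  · exact ⟨339, by decide, by intro f hf; simp only [FVals] at hf; fin_cases hf <;> omega⟩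
  by_cases h16 : (333 : Int) ≤ l
  · exact ⟨333, by decide, by intro f hf; simp only [FVals] at hf; fin_cases hf <;> omega⟩
  by_cases h17 : (317 : Int) ≤ l
  · exact ⟨317, by decide, by intro f hf; simp only [FVals] at hf; fin_cases hf <;> omega⟩
  by_cases h18 : (314 : Int) ≤ l
  · exact ⟨314, by decide, by intro f hf; simp only [FVals] at hf; fin_cases hf <;> omega⟩
  by_cases h19 : (306 : Int) ≤ l
  · exact ⟨306, by decide, by intro f hf; simp only [FVals] at hf; fin_cases hf <;> omega⟩
  by_cases h20 : (298 : Int) ≤ l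
  · exact ⟨298, by decide, by intro f hf; simp only [FVals] at hf; fin_cases hf <;> omega⟩
  by_cases h21 : (290 : Int) ≤ l
  · exact ⟨290, by decide, by intro f hf; simp only [FVals] at hf; fin_cases hf <;> omega⟩
  by_cases h22 : (280 : Int) ≤ l
  · exact ⟨280, by decide, by intro f hf; simp only [FVals] at hf; fin_cases hf <;> omega⟩
  by_cases h23 : (275 : Int) ≤ l
  · exact ⟨275, by decide, by intro f hf; simp only [FVals] at hf; fin_cases hf <;> omega⟩
  by_cases h24 : (273 : Int) ≤ l
  · exact ⟨273, by decide, by intro f hf; simp only [FVals] at hf; fin_cases hf <;> omega⟩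
  by_cases h25 : (238 : Int) ≤ l
  · exact ⟨238, by decide, by intro f hf; simp only [FVals] at hf; fin_cases hf <;> omega⟩
  by_cases h26 : (211 : Int) ≤ l
  · exact ⟨211, by decide, by intro f hf; simp only [FVals] at hf; fin_cases hf <;> omega⟩
  by_cases h27 : (201 : Int) ≤ l
  · exact ⟨201, by decide, by intro f hf; simp only [FVals] at hf; fin_cases hf <;> omega⟩
  by_cases h28 : (197 : Int) ≤ l
  · exact ⟨197, by decide, by intro f hf; simp only [FVals] at hf; fin_cases hf <;> omega⟩
  by_cases h29 : (101 : Int) ≤ l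
  · exact ⟨101, by decide, by intro f hf; simp only [FVals] at hf; fin_cases hf <;> omega⟩
  by_cases h30 : (75 : Int) ≤ l
  · exact ⟨75, by decide, by intro f hf; simp only [FVals] at hf; fin_cases hf <;> omega⟩
  by_cases h31 : (70 : Int) ≤ l
  · exact ⟨70, by decide, by intro f hf; simp only [FVals] at hf; fin_cases hf <;> omega⟩
  exact ⟨69, by decide, by intro f hf; simp only [FVals] at hf; fin_cases hf <;> omega⟩
set_option maxHeartbeats 4000000 in
lemma adeq : ∀ c ∈ cityList, ∀ g ∈ ("?" :: cityList), ∀ l ∈ repList,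
    Pre_rbfs_search c g [] l → (goA 30 c g [] l).isSome = true := by decide

lemma stepB_nil (fb : Nat) (g : String) (h : 1 ≤ fb) : stepB fb [] g = some none := by
  cases fb with
  | zero => omega
  | succ m => rw [stepB]

lemma safeA_sub : ∀ x ∈ safeA, x ∈ cityList := by decide
lemma safeC_sub : ∀ x ∈ safeC, x ∈ cityList := by decide

-- ===== VERDICT (by name: the statement is the Claim_ definition above) =====
theorem rbfs_search_spec : Claim_equal_rbfs_search := by
  unfold Claim_equal_rbfs_search
  intro s g p l _hDom hPre
  unfold Spec_rbfs_search rbfs_search rbfs_search_alt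
  by_cases hsg : s = g
  · subst hsg
    have hA : goA 30 s s p l = some (some p) := by rw [goA]; simp
    have hB : stepB (6 ^ 32) [(s, p, l, 0)] s = some (some p) := by
      have he : (6:Nat) ^ 32 = (6 ^ 32 - 1) + 1 := by norm_num
      rw [he, stepB_goal _ _ _ _ _ _ _ rfl]
    rw [hA, hB]
  · -- start ≠ goal: start must be a map city
    have hcity : s ∈ cityList := by
      rcases hPre with h | h | ⟨rfl, _⟩ | ⟨rfl, _⟩ | ⟨rfl, _⟩ | ⟨rfl, _⟩ | ⟨rfl, _⟩
      · exact absurd h hsg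
      · fin_cases h <;> decide
      all_goals decide
    obtain ⟨l', hl'rep, hpat⟩ := repPattern l
    have h447 := hpat 447 (by decide)
    have h355 := hpat 355 (by decide)
    have h506 := hpat 506 (by decide)
    have h314 := hpat 314 (by decide)
    have h362 := hpat 362 (by decide)
    -- choose the goal representative G
    have hG : ∃ G, G ∈ ("?" :: cityList) ∧ goA 30 s g [] l' = goA 30 s G [] l' ∧
        Pre_rbfs_search s G [] l' := by
      by_cases hgc : g ∈ cityList
      · refine ⟨g, List.mem_cons_of_mem _ hgc, rfl, ?_⟩
        rcases hPre with h | h | ⟨rfl, h⟩ | ⟨rfl, h⟩ | ⟨rfl, h⟩ | ⟨rfl, h⟩ | ⟨rfl, h⟩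
        · exact absurd h hsg
        · exact Or.inr (Or.inl h)
        · refine Or.inr (Or.inr (Or.inl ⟨rfl, ?_⟩))
          rcases h with h | h
          · exact Or.inl (by omega)
          · exact Or.inr h
        · refine Or.inr (Or.inr (Or.inr (Or.inl ⟨rfl, ?_⟩)))
          rcases h with h | h
          · exact Or.inl (by omega)
          · exact Or.inr h
        · refine Or.inr (Or.inr (Or.inr (Or.inr (Or.inl ⟨rfl, ?_⟩))))
          rcases h with h | h
          · exact Or.inl (by omega)
          · exact Or.inr h
        · refine Or.inr (Or.inr (Or.inr (Or.inr (Or.inr (Or.inl ⟨rfl, ?_⟩)))))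
          rcases h with h | h
          · exact Or.inl (by omega)
          · exact Or.inr h
        · refine Or.inr (Or.inr (Or.inr (Or.inr (Or.inr (Or.inr ⟨rfl, ?_⟩)))))
          rcases h with h | h
          · exact Or.inl (by omega)
          · exact Or.inr h
      · refine ⟨"?", List.mem_cons_self, goalGo 30 s g "?" [] l' hgc (by decide) hcity, ?_⟩
        rcases hPre with h | h | ⟨rfl, h⟩ | ⟨rfl, h⟩ | ⟨rfl, h⟩ | ⟨rfl, h⟩ | ⟨rfl, h⟩
        · exact absurd h hsg
        · exact Or.inr (Or.inl h)
        · refine Or.inr (Or.inr (Or.inl ⟨rfl, Or.inl ?_⟩))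
          rcases h with h | h
          · omega
          · exact absurd (safeA_sub g h) hgc
        · refine Or.inr (Or.inr (Or.inr (Or.inl ⟨rfl, Or.inl ?_⟩)))
          rcases h with h | h
          · omega
          · exact absurd (h ▸ (by decide : ("Lugoj" : String) ∈ cityList)) hgc
        · refine Or.inr (Or.inr (Or.inr (Or.inr (Or.inl ⟨rfl, Or.inl ?_⟩))))
          rcases h with h | h
          · omega
          · exact absurd (safeA_sub g h) hgc
        · refine Or.inr (Or.inr (Or.inr (Or.inr (Or.inr (Or.inl ⟨rfl, Or.inl ?_⟩)))))
          rcases h with h | h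
          · omega
          · exact absurd (h ▸ (by decide : ("Lugoj" : String) ∈ cityList)) hgc
        · refine Or.inr (Or.inr (Or.inr (Or.inr (Or.inr (Or.inr ⟨rfl, Or.inl ?_⟩)))))
          rcases h with h | h
          · omega
          · exact absurd (safeC_sub g h) hgc
    obtain ⟨G, hGmem, hGeq, hPreG⟩ := hG
    have hsome := adeq s hcity G hGmem l' hl'rep hPreG
    obtain ⟨r0, hr0⟩ := Option.isSome_iff_exists.mp hsome
    have h30 : goA 30 s g p l = some (Option.map (fun t => p ++ t) r0) := by
      have hp1 : goA 30 s g p l = Option.map (Option.map (p ++ ·)) (goA 30 s g [] l) := by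
        have := pathGo 30 s g [] l p
        rwa [List.append_nil] at this
      rw [hp1, gapGo 30 s g [] l l' hpat, hGeq, hr0]
      rfl
    have hpf : procFrame 29 s g p l 0 = some (Option.map (fun t => p ++ t) r0) := by
      rw [← goA_succ 29 s g p l]; exact h30
    obtain ⟨k, hk1, hkb, hstep⟩ := sim 29 s g p l 0 [] _ hpf
    have hk31 : k ≤ 6 ^ 31 := hkb
    have hlt : (6:Nat) ^ 31 < 6 ^ 32 := Nat.pow_lt_pow_succ (by norm_num)
    have he : (6:Nat) ^ 32 = (6 ^ 32 - k) + k := by omega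
    have hb := hstep (6 ^ 32 - k)
    rw [← he] at hb
    rcases r0 with _ | out
    · simp only [Option.map_none] at h30 hb
      rw [h30, hb, stepB_nil _ _ (by omega)]
    · simp only [Option.map_some] at h30 hb
      rw [h30, hb]
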